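-- pv_equiv track=rewrite | github.com/lianlian-YE/Mypycharm | Python_file/python_westos_teacher_doc/day11/04_判断棋盘是否可移动.py | move_left_possible
-- ===== SOURCE A (Python) =====
-- def move_left_possible(row):
--     """判断列表中的一行是否可以移动"""
--     # 0 2, 0 4, 2 2, 4 2
--     # 0 0
--     # # 1. 判断两个元素是否可以移动?
--     # 4,2,2,2
--     def is_change(i):
--         if row[i] == 0 and row[i + 1] != 0:
--             return True
--         if row[i] != 0 and row[i + 1] == row[i]:
--             return True
--         return False
--
--     # len(row)-1 =4-1 = 3
--     # i= 0,1,2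
--     # 依次遍历每一行的每一个元素， 判断是否可以移动， 只要有一个时可以移动的， 返回True
--     return any([is_change(i) for i in range(len(row) - 1)])
-- ===== SOURCE B (Python) =====
-- def move_left_possible(row):
--     """判断列表中的一行是否可以移动"""
--     # Compute the full left-slide of the row (2048 style) and compare:
--     # drop zeros, merge each pair of equal neighbours exactly once, pad
--     # with zeros back to the original length.  The row is movable iff
--     # the slid row differs from the original.  The input is not mutated.
--     tiles = [x for x in row if x != 0]
--     merged = []
--     i = 0
--     while i < len(tiles):
--         if i + 1 < len(tiles) and tiles[i] == tiles[i + 1]: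
--             merged.append(tiles[i] * 2)
--             i += 2
--         else:
--             merged.append(tiles[i])
--             i += 1
--     slid = merged + [0] * (len(row) - len(merged))
--     return slid != row
-- ===== Notes on version B (the rewrite author's own statement) =====
-- stated objective: alternative
-- what changed: Instead of scanning index pairs for a movable adjacent pair, B computes the actual left-slide of the row (drop zeros, merge equal neighbours once, pad with zeros) and returns whether the slid row differs from the original.
import Mathlib
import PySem

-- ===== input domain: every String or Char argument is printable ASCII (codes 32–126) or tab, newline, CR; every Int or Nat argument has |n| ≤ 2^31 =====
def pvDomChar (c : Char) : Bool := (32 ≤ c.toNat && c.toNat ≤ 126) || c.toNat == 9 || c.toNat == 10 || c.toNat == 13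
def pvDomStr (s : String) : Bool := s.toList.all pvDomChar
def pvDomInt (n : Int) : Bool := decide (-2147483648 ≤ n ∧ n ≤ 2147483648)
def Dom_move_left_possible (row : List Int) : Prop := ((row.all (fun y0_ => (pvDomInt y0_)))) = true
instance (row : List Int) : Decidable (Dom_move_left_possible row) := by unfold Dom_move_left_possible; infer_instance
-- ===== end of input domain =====

-- B computes the actual left-slide of the row and compares it with the original,
-- instead of A's index scan for a movable adjacent pair (objective: alternative algorithm).

-- ===== PORT A =====
def move_left_possible (row : List Int) : Bool :=
  let is_change : Int → Bool := fun i =>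
    if PySem.List.pyGetD row i 0 = 0 ∧ PySem.List.pyGetD row (i + 1) 0 ≠ 0 then true
    else if PySem.List.pyGetD row i 0 ≠ 0 ∧ PySem.List.pyGetD row (i + 1) 0 = PySem.List.pyGetD row i 0 then true
    else false
  ((PySem.List.pyRange 0 ((row.length : Int) - 1) 1).map is_change).any id

-- ===== PORT B =====
-- the while-loop of Source B merging each pair of equal neighbours exactly once
def mlpMerge : List Int → List Int
  | [] => []
  | [a] => [a]
  | a :: b :: rest => if a = b then (a * 2) :: mlpMerge rest else a :: mlpMerge (b :: rest)

def move_left_possible_alt (row : List Int) : Bool :=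
  let tiles := row.filter (fun x => x ≠ 0)
  let merged := mlpMerge tiles
  let slid := merged ++ List.replicate (row.length - merged.length) 0
  decide (slid ≠ row)

-- ===== PRECONDITION & SPEC =====
def Spec_move_left_possible (row : List Int) (out : Bool) : Prop := out = move_left_possible_alt row
instance (row : List Int) (out : Bool) : Decidable (Spec_move_left_possible row out) := by unfold Spec_move_left_possible; infer_instance

-- ===== CLAIM (what is proved, stated in full; the proofs are below) =====
def Claim_equal_move_left_possible : Prop := ∀ (row : List Int), Dom_move_left_possible row → Spec_move_left_possible row (move_left_possible row)

-- ===== LEMMAS AND PROOFS =====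

-- structural rephrasing of A's adjacent-pair scan
def mlpScan : List Int → Bool
  | a :: b :: r => ((decide (a = 0) && decide (b ≠ 0)) || (decide (a ≠ 0) && decide (b = a))) || mlpScan (b :: r)
  | _ => false

-- the slid row Source B builds
def mlpSlide (row : List Int) : List Int :=
  let merged := mlpMerge (row.filter (fun x => x ≠ 0))
  merged ++ List.replicate (row.length - merged.length) 0

theorem mlp_alt_eq (row : List Int) :
    move_left_possible_alt row = decide (mlpSlide row ≠ row) := by
  simp [move_left_possible_alt, mlpSlide]

theorem mlp_anyChg (l : List Int) :
    ((List.range (l.length - 1)).map (fun k : Nat =>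
      if l.getD k 0 = 0 ∧ l.getD (k + 1) 0 ≠ 0 then true
      else if l.getD k 0 ≠ 0 ∧ l.getD (k + 1) 0 = l.getD k 0 then true else false)).any id
    = mlpScan l := by
  induction l with
  | nil => simp [mlpScan]
  | cons a l ih =>
    cases l with
    | nil => simp [mlpScan]
    | cons b r =>
      have hlen : (a :: b :: r).length - 1 = (b :: r).length - 1 + 1 := by simp
      rw [hlen, List.range_succ_eq_map]
      simp only [List.map_cons, List.any_cons, List.map_map]
      have hmap : ∀ k ∈ List.range ((b :: r).length - 1),
          ((fun k : Nat =>
            if (a :: b :: r).getD k 0 = 0 ∧ (a :: b :: r).getD (k + 1) 0 ≠ 0 then true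
            else if (a :: b :: r).getD k 0 ≠ 0 ∧ (a :: b :: r).getD (k + 1) 0 = (a :: b :: r).getD k 0 then true else false) ∘ Nat.succ) k
          = (fun k : Nat =>
            if (b :: r).getD k 0 = 0 ∧ (b :: r).getD (k + 1) 0 ≠ 0 then true
            else if (b :: r).getD k 0 ≠ 0 ∧ (b :: r).getD (k + 1) 0 = (b :: r).getD k 0 then true else false) k := by
        intro k hk
        simp [Function.comp]
      rw [List.map_congr_left hmap, ih]
      simp only [mlpScan, List.getD_cons_zero, List.getD_cons_succ]
      split_ifs <;> simp_all

theorem mlp_A_eq_scan (row : List Int) : move_left_possible row = mlpScan row := by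
  unfold move_left_possible
  rw [PySem.List.pyRange_one]
  have ht : (((row.length : Int) - 1) - 0).toNat = row.length - 1 := by omega
  rw [ht]
  simp only [List.map_map]
  have hmap : ∀ k ∈ List.range (row.length - 1),
      ((fun i : Int =>
        if PySem.List.pyGetD row i 0 = 0 ∧ PySem.List.pyGetD row (i + 1) 0 ≠ 0 then true
        else if PySem.List.pyGetD row i 0 ≠ 0 ∧ PySem.List.pyGetD row (i + 1) 0 = PySem.List.pyGetD row i 0 then true else false) ∘ (fun k : Nat => (0 : Int) + k)) k
      = (fun k : Nat =>
        if row.getD k 0 = 0 ∧ row.getD (k + 1) 0 ≠ 0 then true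
        else if row.getD k 0 ≠ 0 ∧ row.getD (k + 1) 0 = row.getD k 0 then true else false) k := by
    intro k hk
    have h1 : (0 : Int) + (k : Int) = ((k : Nat) : Int) := by ring
    have h2 : (k : Int) + 1 = (((k + 1 : Nat)) : Int) := by push_cast; ring
    simp only [Function.comp, h1, h2, PySem.List.pyGetD_natCast]
  rw [List.map_congr_left hmap]
  exact mlp_anyChg row

theorem mlpMerge_eq_nil {t : List Int} : mlpMerge t = [] ↔ t = [] := by
  cases t with
  | nil => simp [mlpMerge]
  | cons a t =>
    cases t with
    | nil => simp [mlpMerge]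
    | cons b t => simp only [mlpMerge]; split <;> simp

theorem mlpMerge_nonzero {t : List Int} (h : ∀ x ∈ t, x ≠ 0) :
    ∀ y ∈ mlpMerge t, y ≠ 0 := by
  induction t using mlpMerge.induct with
  | case1 => simp [mlpMerge]
  | case2 a => simpa [mlpMerge] using h a (by simp)
  | case3 a rest ih =>
    intro y hy
    rw [mlpMerge, if_pos rfl] at hy
    rcases List.mem_cons.mp hy with hy | hy
    · subst hy
      have := h a (by simp)
      omega
    · exact ih (fun x hx => h x (by simp [hx])) y hy
  | case4 a b rest hab ih =>
    intro y hy
    rw [mlpMerge, if_neg hab] at hy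
    rcases List.mem_cons.mp hy with hy | hy
    · subst hy; exact h y (by simp)
    · exact ih (fun x hx => h x (by simp at hx ⊢; tauto)) y hy

theorem mlp_mem_filter_nonzero {l : List Int} {x : Int}
    (hx : x ∈ l.filter (fun x => x ≠ 0)) : x ≠ 0 := by
  simpa using (List.mem_filter.mp hx).2

theorem mlp_allZero_scan {l : List Int} (h : ∀ x ∈ l, x = 0) : mlpScan l = false := by
  induction l with
  | nil => simp [mlpScan]
  | cons a l ih =>
    cases l with
    | nil => simp [mlpScan]
    | cons b r =>
      have ha := h a (by simp)
      have hb := h b (by simp)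
      subst ha; subst hb
      simp [mlpScan, ih (fun x hx => h x (by simp at hx ⊢; tauto))]

theorem mlp_scan_zero_head {l : List Int} (h : mlpScan (0 :: l) = false) :
    ∀ x ∈ l, x = 0 := by
  induction l with
  | nil => simp
  | cons c r ih =>
    simp [mlpScan] at h
    obtain ⟨hc, h2⟩ := h
    subst hc
    intro x hx
    rcases List.mem_cons.mp hx with hx | hx
    · exact hx
    · exact ih (by simpa [mlpScan] using h2) x hx

theorem mlp_replicate_self {l : List Int} (h : ∀ x ∈ l, x = 0) :
    List.replicate l.length 0 = l := by
  induction l with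
  | nil => simp
  | cons a l ih =>
    rw [h a (by simp)]
    simp [List.replicate_succ, ih (fun x hx => h x (by simp [hx]))]

theorem mlp_filter_nil {l : List Int} (h : ∀ x ∈ l, x = 0) :
    l.filter (fun x => x ≠ 0) = [] := by
  rw [List.filter_eq_nil_iff]
  intro x hx
  simpa using h x hx

theorem mlp_slide_allZero {l : List Int} (h : ∀ x ∈ l, x = 0) : mlpSlide l = l := by
  unfold mlpSlide
  rw [mlp_filter_nil h]
  simpa [mlpMerge] using mlp_replicate_self h

theorem mlp_scanFalse (l : List Int) (h : mlpScan l = false) : mlpSlide l = l := by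
  induction l with
  | nil => simp [mlpSlide, mlpMerge]
  | cons a l ih =>
    cases l with
    | nil =>
      unfold mlpSlide
      by_cases ha : a = 0 <;> simp [ha, mlpMerge]
    | cons b r =>
      have h0 := h
      by_cases ha : a = 0
      · subst ha
        exact mlp_slide_allZero (by
          intro x hx
          rcases List.mem_cons.mp hx with hx | hx
          · exact hx
          · exact mlp_scan_zero_head h0 x hx)
      · by_cases hb : b = 0
        · subst hb
          simp [mlpScan, ha] at h
          obtain ⟨-, hsc⟩ := h
          have hr : ∀ x ∈ r, x = 0 := mlp_scan_zero_head hsc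
          unfold mlpSlide
          have hf : (a :: (0:Int) :: r).filter (fun x => x ≠ 0) = [a] := by
            simp [ha]
            exact hr
          rw [hf]
          simp [mlpMerge]
          have : ∀ x ∈ (0:Int) :: r, x = 0 := by
            intro x hx
            rcases List.mem_cons.mp hx with hx | hx
            · exact hx
            · exact hr x hx
          simpa using mlp_replicate_self this
        · simp [mlpScan, ha, hb] at h
          obtain ⟨hba, hsc⟩ := h
          have hs := ih hsc
          unfold mlpSlide at hs ⊢
          have hf : (a :: b :: r).filter (fun x => x ≠ 0) =
              a :: b :: r.filter (fun x => x ≠ 0) := by simp [ha, hb]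
          rw [hf]
          rw [mlpMerge, if_neg (fun hh => hba hh.symm)]
          have hfb : (b :: r).filter (fun x => x ≠ 0) = b :: r.filter (fun x => x ≠ 0) := by
            simp [hb]
          rw [hfb] at hs
          simp only [List.cons_append, List.length_cons]
          have hlen : (b :: r).length + 1 - ((mlpMerge (b :: r.filter (fun x => x ≠ 0))).length + 1)
              = (b :: r).length - (mlpMerge (b :: r.filter (fun x => x ≠ 0))).length := by omega
          simp only [List.length_cons] at hs hlen ⊢
          rw [hlen]
          exact congrArg (a :: ·) hs

theorem mlp_slideEq (l : List Int) (h : mlpSlide l = l) : mlpScan l = false := by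
  induction l with
  | nil => simp [mlpScan]
  | cons a l ih =>
    cases l with
    | nil => simp [mlpScan]
    | cons b r =>
      by_cases ha : a = 0
      · subst ha
        unfold mlpSlide at h
        cases hm : mlpMerge (((0:Int) :: b :: r).filter (fun x => x ≠ 0)) with
        | cons y ys =>
          exfalso
          have hy : y ≠ 0 :=
            mlpMerge_nonzero (t := ((0:Int) :: b :: r).filter (fun x => x ≠ 0))
              (fun x hx => mlp_mem_filter_nonzero hx) y (by rw [hm]; simp)
          rw [hm] at h
          simp at h
          exact hy h.1
        | nil =>
          have hz : ((0:Int) :: b :: r).filter (fun x => x ≠ 0) = [] := mlpMerge_eq_nil.mp hm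
          apply mlp_allZero_scan
          intro x hx
          by_contra hx0
          have hmem : x ∈ ((0:Int) :: b :: r).filter (fun x => x ≠ 0) :=
            List.mem_filter.mpr ⟨hx, by simpa using hx0⟩
          rw [hz] at hmem
          simp at hmem
      · cases hft : (b :: r).filter (fun x => x ≠ 0) with
        | nil =>
          have hz : ∀ x ∈ b :: r, x = 0 := by
            intro x hx
            by_contra hx0
            have hmem : x ∈ (b :: r).filter (fun x => x ≠ 0) :=
              List.mem_filter.mpr ⟨hx, by simpa using hx0⟩
            rw [hft] at hmem
            simp at hmem
          have hb : b = 0 := hz b (by simp)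
          subst hb
          have hsc := mlp_allZero_scan hz
          simp [mlpScan, hsc]
          omega
        | cons c t =>
          have hc : c ≠ 0 := mlp_mem_filter_nonzero (l := b :: r) (by rw [hft]; simp)
          unfold mlpSlide at h
          have hf : (a :: b :: r).filter (fun x => x ≠ 0) = a :: c :: t := by
            rw [List.filter_cons_of_pos (by simpa using ha), hft]
          rw [hf] at h
          by_cases hac : a = c
          · exfalso
            rw [mlpMerge, if_pos hac] at h
            simp at h
            have := h.1
            omega
          · rw [mlpMerge, if_neg hac] at h
            simp only [List.cons_append, List.length_cons, List.cons.injEq] at h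
            obtain ⟨-, htail⟩ := h
            have hlen : r.length + 1 + 1 - ((mlpMerge (c :: t)).length + 1)
                = r.length + 1 - (mlpMerge (c :: t)).length := by omega
            rw [hlen] at htail
            have hsr : mlpScan (b :: r) = false := by
              apply ih
              unfold mlpSlide
              rw [hft]
              simpa using htail
            have hba : ¬ b = a := by
              by_cases hb : b = 0
              · subst hb; exact fun hh => ha hh.symm
              · have hft' := hft
                rw [List.filter_cons_of_pos (by simpa using hb)] at hft'
                injection hft' with hbc _
                exact fun hh => hac (hh ▸ hbc)
            simp [mlpScan, ha, hba, hsr]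

-- ===== VERDICT (by name: the statement is the Claim_ definition above) =====
theorem move_left_possible_spec : Claim_equal_move_left_possible := by
  intro row _
  unfold Spec_move_left_possible
  rw [mlp_alt_eq, mlp_A_eq_scan]
  cases h : mlpScan row with
  | false => simp [mlp_scanFalse row h]
  | true =>
    have : mlpSlide row ≠ row := fun he => by simp [mlp_slideEq row he] at h
    simp [this]
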